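-- pv_equiv track=rewrite | github.com/UngCoding/kt20230203 | Exercise-Chapter2-Q5.py | solution
-- ===== SOURCE A (Python) =====
-- def solution(n, s):
--     multi_set = []
--     multiply = 1
--     answer = [-1]
--     for i in range(1, s//2 + 1):
--         multi_set.append([i, s - i])
--     for i in multi_set:
--         if multiply < i[0] * i[1]:
--             multiply = i[0] * i[1]
--             answer = i
--     return answer
-- ===== SOURCE B (Python) =====
-- def solution(n, s):
--     h = s // 2
--     if h >= 1 and h * (s - h) > 1:
--         return [h, s - h]
--     return [-1]
-- ===== Notes on version B (the rewrite author's own statement) =====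
-- stated objective: faster
-- what changed: Replaces the O(s) pair-list construction and linear max-product scan with the closed form [s//2, s - s//2] (the product i*(s-i) is strictly increasing up to s//2), falling back to [-1] when the range is empty or the best product is <= 1.
import Mathlib
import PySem

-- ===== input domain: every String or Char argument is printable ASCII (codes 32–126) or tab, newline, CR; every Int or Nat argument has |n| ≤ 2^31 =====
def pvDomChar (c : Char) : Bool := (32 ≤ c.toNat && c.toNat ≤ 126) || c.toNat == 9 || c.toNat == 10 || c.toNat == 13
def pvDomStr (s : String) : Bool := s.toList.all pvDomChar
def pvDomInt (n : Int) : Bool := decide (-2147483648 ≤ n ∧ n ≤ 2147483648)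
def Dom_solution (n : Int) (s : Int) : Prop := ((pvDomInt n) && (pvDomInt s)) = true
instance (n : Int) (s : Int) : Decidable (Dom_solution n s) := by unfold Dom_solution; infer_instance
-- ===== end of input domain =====

-- B replaces A's O(s) pair list + linear max-product scan with the O(1) closed form [s//2, s - s//2].

-- ===== PORT A =====
-- literal port: build multi_set, then scan for the max product with state (multiply, answer);
-- i[0]/i[1] via pyGet? (every element is a 2-list, so the index is always in range; .getD 0 is never taken)
def solution (n : Int) (s : Int) : List Int :=
  let multi_set : List (List Int) :=
    (PySem.List.pyRange 1 (PySem.Int.floordiv s 2 + 1) 1).map (fun i => [i, s - i])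
  let st : Int × List Int :=
    multi_set.foldl
      (fun st i =>
        let p := ((PySem.List.pyGet? i 0).getD 0) * ((PySem.List.pyGet? i 1).getD 0)
        if st.1 < p then (p, i) else st)
      (1, [-1])
  st.2

-- ===== PORT B =====
def solution_alt (n : Int) (s : Int) : List Int :=
  let h := PySem.Int.floordiv s 2
  if 1 ≤ h ∧ 1 < h * (s - h) then [h, s - h] else [-1]

-- ===== PRECONDITION & SPEC =====
def Spec_solution (n : Int) (s : Int) (out : List Int) : Prop := out = solution_alt n s
instance (n : Int) (s : Int) (out : List Int) : Decidable (Spec_solution n s out) := by unfold Spec_solution; infer_instance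

-- ===== CLAIM (what is proved, stated in full; the proofs are below) =====
def Claim_equal_solution : Prop := ∀ (n : Int) (s : Int), Dom_solution n s → Spec_solution n s (solution n s)

-- ===== LEMMAS AND PROOFS =====

-- A's scan over i = 1..k keeps (1,[-1]) while the best product is ≤ 1, else the last pair seen,
-- because the product i*(s-i) is strictly increasing while i ≤ s//2.
theorem solution_loop (s : Int) (k : Nat) (hk : (k : Int) ≤ PySem.Int.floordiv s 2) :
    (PySem.List.pyRange 1 ((k : Int) + 1) 1).foldl
      (fun (st : Int × List Int) i =>
        if st.1 < i * (s - i) then (i * (s - i), [i, s - i]) else st)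
      (1, [-1])
    = if (k : Int) * (s - (k : Int)) ≤ 1 then (1, [-1])
      else ((k : Int) * (s - (k : Int)), [(k : Int), s - (k : Int)]) := by
  have hdiv : PySem.Int.floordiv s 2 = s / 2 := PySem.Int.floordiv_eq_ediv_of_pos (by omega)
  rw [hdiv] at hk
  induction k with
  | zero =>
      push_cast
      rw [PySem.List.pyRange_one_eq_nil (le_refl (1:Int))]
      norm_num
  | succ k ih =>
      have hk' : (k : Int) ≤ s / 2 := by push_cast at hk ⊢; omega
      have hs : 2 * ((k : Int) + 1) ≤ s := by push_cast at hk; omega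
      rw [(by push_cast; ring : ((k:Nat).succ : Int) + 1 = ((k : Int) + 1) + 1),
          PySem.List.pyRange_one_succ_right (by omega : (1:Int) ≤ (k:Int) + 1),
          List.foldl_append, ih hk']
      have hexp : ((k:Int)+1) * (s - ((k:Int)+1)) = (k:Int) * (s - k) + (s - 2*k - 1) := by ring
      by_cases h1 : (k : Int) * (s - (k : Int)) ≤ 1
      · -- old state is (1,[-1])
        push_cast
        by_cases h2 : ((k:Int)+1) * (s - ((k:Int)+1)) ≤ 1
        · simp [h1, h2, List.foldl, not_lt.mpr h2]
        · simp [h1, h2, List.foldl, not_le.mp h2]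
      · -- old state carries k*(s-k) > 1; the new product is strictly larger
        have hlt : (k : Int) * (s - (k : Int)) < ((k:Int)+1) * (s - ((k:Int)+1)) := by
          rw [hexp]; omega
        have h2 : ¬ ((k:Int)+1) * (s - ((k:Int)+1)) ≤ 1 := by
          have := not_le.mp h1; omega
        push_cast
        simp [h1, h2, List.foldl, hlt]

theorem solution_eq (n s : Int) : solution n s = solution_alt n s := by
  unfold solution solution_alt
  have hdiv : PySem.Int.floordiv s 2 = s / 2 := PySem.Int.floordiv_eq_ediv_of_pos (by omega)
  simp only [List.foldl_map, hdiv, PySem.List.pyGet?, PySem.List.pyIdx?]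
  norm_num
  by_cases hpos : 1 ≤ s / 2
  · have hc : ((s / 2).toNat : Int) = s / 2 := by omega
    have hl := solution_loop s (s / 2).toNat (by rw [hc, hdiv])
    rw [hc] at hl
    rw [hl]
    by_cases hp : s / 2 * (s - s / 2) ≤ 1
    · simp [hp, hpos, not_lt.mpr hp]
    · simp [hp, hpos, not_le.mp hp]
  · rw [PySem.List.pyRange_one_eq_nil (by omega : s / 2 + 1 ≤ 1)]
    simp [hpos]

-- ===== VERDICT (by name: the statement is the Claim_ definition above) =====
theorem solution_spec : Claim_equal_solution := by
  intro n s _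
  unfold Spec_solution
  exact solution_eq n s
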